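-- pv_equiv track=rewrite | github.com/LaminarFlow24/Leetcode | 564.py | convert
-- ===== SOURCE A (Python) =====
-- def convert(s):
--     lis = []
--     for i in range(len(s)):
--         lis.append(s[i])
--
--     if len(lis) % 2 != 0:
--         m = len(lis) // 2
--         for i in range(1,(len(s)//2)+1):
--             lis[m+i] = lis[m-i]
--
--     if len(lis) % 2 == 0:
--         m = len(lis) // 2
--         n = (len(lis) // 2) - 1
--
--         for i in range(0,(len(s)//2)):
--             lis[m+i] = lis[n-i]
--
--     m = ""
--
--     for i in range(len(s)):
--         m += lis[i]
--
--     return m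
-- ===== SOURCE B (Python) =====
-- def convert(s):
--     h = len(s) // 2
--     first = s[:h]
--     if len(s) % 2 == 0:
--         return first + first[::-1]
--     return first + s[h] + first[::-1]
-- ===== Notes on version B (the rewrite author's own statement) =====
-- stated objective: simpler
-- what changed: Replaces A's three index loops and in-place list mutation with direct slicing: the palindrome is built as first-half + (middle char if odd) + reversed first half.
import Mathlib
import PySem

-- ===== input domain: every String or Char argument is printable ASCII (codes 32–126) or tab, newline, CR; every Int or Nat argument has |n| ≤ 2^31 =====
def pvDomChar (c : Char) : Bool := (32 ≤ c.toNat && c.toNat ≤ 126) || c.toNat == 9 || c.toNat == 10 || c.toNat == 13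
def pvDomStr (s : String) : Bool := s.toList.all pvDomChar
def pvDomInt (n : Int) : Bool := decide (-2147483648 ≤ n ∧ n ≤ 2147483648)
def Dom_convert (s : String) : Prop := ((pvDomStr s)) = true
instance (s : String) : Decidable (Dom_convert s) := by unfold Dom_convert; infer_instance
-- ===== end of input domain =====

-- B builds the palindrome by slicing (first half + middle + reversed first half) instead of A's
-- three index loops over a mutable char list; objective: simpler.

-- ===== PORT A =====
def convert (s : String) : String :=
  let cs : List Char := s.toList
  let n : Int := (cs.length : Int)
  -- lis = []; for i in range(len(s)): lis.append(s[i])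
  let lis : List Char :=
    (PySem.List.pyRange 0 n 1).foldl (fun l i => l ++ [PySem.List.pyGetD cs i ' ']) []
  -- if len(lis) % 2 != 0: mirror odd
  let lis : List Char :=
    if PySem.Int.mod (lis.length : Int) 2 ≠ 0 then
      let m : Int := PySem.Int.floordiv (lis.length : Int) 2
      (PySem.List.pyRange 1 (PySem.Int.floordiv n 2 + 1) 1).foldl
        (fun l i => PySem.List.pySetD l (m + i) (PySem.List.pyGetD l (m - i) ' ')) lis
    else lis
  -- if len(lis) % 2 == 0: mirror even
  let lis : List Char :=
    if PySem.Int.mod (lis.length : Int) 2 = 0 then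
      let m : Int := PySem.Int.floordiv (lis.length : Int) 2
      let n1 : Int := PySem.Int.floordiv (lis.length : Int) 2 - 1
      (PySem.List.pyRange 0 (PySem.Int.floordiv n 2) 1).foldl
        (fun l i => PySem.List.pySetD l (m + i) (PySem.List.pyGetD l (n1 - i) ' ')) lis
    else lis
  -- m = ""; for i in range(len(s)): m += lis[i]
  String.mk ((PySem.List.pyRange 0 n 1).foldl (fun acc i => acc ++ [PySem.List.pyGetD lis i ' ']) [])

-- ===== PORT B =====
def convert_alt (s : String) : String :=
  let cs : List Char := s.toList
  let h : Int := PySem.Int.floordiv (cs.length : Int) 2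
  let first : List Char := PySem.List.slice cs none (some h)
  if PySem.Int.mod (cs.length : Int) 2 = 0 then
    String.mk (first ++ ((PySem.List.slice? first none none (-1)).getD []))
  else
    String.mk (first ++ [PySem.List.pyGetD cs h ' '] ++ ((PySem.List.slice? first none none (-1)).getD []))

-- ===== PRECONDITION & SPEC =====
def Spec_convert (s : String) (out : String) : Prop := out = convert_alt s
instance (s : String) (out : String) : Decidable (Spec_convert s out) := by unfold Spec_convert; infer_instance

-- ===== CLAIM (what is proved, stated in full; the proofs are below) =====
def Claim_equal_convert : Prop := ∀ (s : String), Dom_convert s → Spec_convert s (convert s)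

-- ===== LEMMAS AND PROOFS =====

-- the append-singleton foldl over range builds the map
theorem pv_foldl_build {α : Type} (f : Nat → α) :
    ∀ (n : Nat), (List.range n).foldl (fun acc k => acc ++ [f k]) [] = (List.range n).map f := by
  intro n
  induction n with
  | zero => simp
  | succ k ih => simp [List.range_succ, ih]

-- the first loop of A reproduces the char list
theorem pv_build_eq (l : List Char) :
    (PySem.List.pyRange 0 (l.length : Int) 1).foldl
      (fun acc i => acc ++ [PySem.List.pyGetD l i ' ']) [] = l := by
  rw [PySem.List.pyRange_zero_natCast, List.foldl_map, pv_foldl_build]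
  apply List.ext_getElem
  · simp
  · intro k h1 h2
    simp at h1
    simp [PySem.List.pyGetD_natCast, List.getD_eq_getElem?_getD, List.getElem?_eq_getElem h1]

-- the mirror loop: after k steps starting writes at position w, the list is
-- first half ++ first k mirrored chars ++ untouched tail
theorem pv_mirror_loop (l : List Char) (m w : Nat) (hw : m ≤ w) (hlen : w + m ≤ l.length) :
    ∀ (k : Nat), k ≤ m →
      (List.range k).foldl
        (fun (l' : List Char) (j : Nat) => PySem.List.pySetD l' ((w : Int) + (j : Int))
          (PySem.List.pyGetD l' ((m : Int) - 1 - (j : Int)) ' ')) l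
      = l.take w ++ (l.take m).reverse.take k ++ l.drop (w + k) := by
  intro k
  induction k with
  | zero => simp
  | succ k ih =>
    intro hk
    have hk' : k ≤ m := by omega
    have hkm : k < m := by omega
    rw [List.range_succ, List.foldl_append, ih hk']
    simp only [List.foldl_cons, List.foldl_nil]
    have hcast : (w : Int) + (k : Int) = ((w + k : Nat) : Int) := by push_cast; ring
    have hcast2 : (m : Int) - 1 - (k : Int) = ((m - 1 - k : Nat) : Int) := by
      omega
    rw [hcast, hcast2, PySem.List.pySetD_natCast, PySem.List.pyGetD_natCast]
    have hlt : m - 1 - k < w := by omega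
    have hwl : w ≤ l.length := by omega
    have htw : (l.take w).length = w := by simp; omega
    have hrevlen : ((l.take m).reverse.take k).length = k := by
      simp; omega
    -- read: index m-1-k lands in the first block, equal to l[m-1-k]
    have hread : (l.take w ++ (l.take m).reverse.take k ++ l.drop (w + k)).getD (m - 1 - k) ' '
        = (l.take m).reverse.getD k ' ' := by
      have h1 : m - 1 - k < l.length := by omega
      have h2 : k < (l.take m).reverse.length := by simp; omega
      rw [List.getD_eq_getElem?_getD, List.getD_eq_getElem?_getD]
      rw [List.getElem?_append_left (by rw [List.length_append, htw, hrevlen]; omega),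
          List.getElem?_append_left (by rw [htw]; omega)]
      rw [List.getElem?_eq_getElem (by omega), List.getElem?_eq_getElem h2]
      simp [List.getElem_reverse, List.getElem_take]
      congr 1
      omega
    rw [hread]
    -- write: index w+k is the head of the dropped tail
    rw [List.append_assoc, List.set_append, if_neg (by rw [htw]; omega), htw]
    rw [List.set_append, if_neg (by rw [hrevlen]; omega), hrevlen]
    have hdrop : l.drop (w + k) = l[w + k]! :: l.drop (w + k + 1) := by
      rw [List.getElem!_eq_getElem?_getD, List.getElem?_eq_getElem (by omega)]
      exact List.drop_eq_getElem_cons (by omega)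
    have hset : (l.drop (w + k)).set (w + k - w - k) ((l.take m).reverse.getD k ' ')
        = (l.take m).reverse.getD k ' ' :: l.drop (w + k + 1) := by
      rw [hdrop]
      simp
    rw [hset]
    have hmid : (l.take m).reverse.take k ++ (l.take m).reverse.getD k ' ' :: l.drop (w + k + 1)
        = (l.take m).reverse.take (k + 1) ++ l.drop (w + (k + 1)) := by
      have h2 : k < (l.take m).reverse.length := by simp; omega
      rw [List.take_add_one]
      rw [List.getElem?_eq_getElem h2]
      simp [List.getD_eq_getElem?_getD, List.getElem?_eq_getElem h2]
      omega
    rw [hmid, List.append_assoc]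

theorem pv_rebuild (l : List Char) (r : List Char) (hlen : r.length = l.length) :
    (PySem.List.pyRange 0 (l.length : Int) 1).foldl
      (fun acc i => acc ++ [PySem.List.pyGetD r i ' ']) [] = r := by
  rw [← hlen]
  exact pv_build_eq r

-- ===== VERDICT (by name: the statement is the Claim_ definition above) =====


-- odd-offset variant of the mirror loop (writes start one past the middle)
theorem pv_mirror_loop_odd (l : List Char) (m : Nat) (hlen : m + 1 + m ≤ l.length) :
    (List.range m).foldl
      (fun (l' : List Char) (k : Nat) => PySem.List.pySetD l' ((m : Int) + (1 + (k : Int)))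
        (PySem.List.pyGetD l' ((m : Int) - (1 + (k : Int))) ' ')) l
    = l.take (m + 1) ++ (l.take m).reverse.take m ++ l.drop (m + 1 + m) := by
  have hfun : (fun (l' : List Char) (k : Nat) => PySem.List.pySetD l' ((m : Int) + (1 + (k : Int)))
        (PySem.List.pyGetD l' ((m : Int) - (1 + (k : Int))) ' '))
      = (fun (l' : List Char) (k : Nat) => PySem.List.pySetD l' (((m + 1 : Nat) : Int) + (k : Int))
        (PySem.List.pyGetD l' ((m : Int) - 1 - (k : Int)) ' ')) := by
    funext l' k
    rw [show (m : Int) + (1 + (k : Int)) = ((m + 1 : Nat) : Int) + (k : Int) by push_cast; ring,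
        show (m : Int) - (1 + (k : Int)) = (m : Int) - 1 - (k : Int) by ring]
  rw [hfun]
  exact pv_mirror_loop l m (m + 1) (by omega) (by omega) m le_rfl

theorem convert_spec : Claim_equal_convert := by
  intro s _
  unfold Spec_convert
  simp only [convert, convert_alt]
  rw [pv_build_eq s.toList]
  rcases Nat.even_or_odd s.toList.length with ⟨m, hm⟩ | ⟨m, hm⟩
  · -- even length: N = m + m
    have h1 : ¬ (PySem.Int.mod ((s.toList.length : Nat) : Int) 2 ≠ 0) := by
      rw [PySem.Int.mod_eq_emod_of_pos (by norm_num)]; omega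
    have h2 : PySem.Int.mod ((s.toList.length : Nat) : Int) 2 = 0 := by
      rw [PySem.Int.mod_eq_emod_of_pos (by norm_num)]; omega
    have hdiv : PySem.Int.floordiv ((s.toList.length : Nat) : Int) 2 = ((m : Nat) : Int) := by
      rw [PySem.Int.floordiv_eq_ediv_of_pos (by norm_num)]; omega
    rw [if_neg h1, if_pos h2, if_pos h2, hdiv]
    rw [PySem.List.pyRange_zero_natCast]
    simp only [List.foldl_map]
    rw [pv_mirror_loop s.toList m m le_rfl (by omega) m le_rfl]
    have hrev : ((s.toList.take m).reverse).take m = (s.toList.take m).reverse := by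
      apply List.take_of_length_le; simp
    have hdropN : s.toList.drop (m + m) = ([] : List Char) := by
      apply List.drop_eq_nil_of_le; omega
    rw [hrev, hdropN, List.append_nil]
    rw [pv_rebuild s.toList _
      (by simp only [List.length_append, List.length_reverse, List.length_take]; omega)]
    rw [PySem.List.slice_to_natCast, PySem.List.slice?_none_none_neg_one]
    simp
  · -- odd length: N = 2 * m + 1
    have h1 : PySem.Int.mod ((s.toList.length : Nat) : Int) 2 ≠ 0 := by
      rw [PySem.Int.mod_eq_emod_of_pos (by norm_num)]; omega
    have hdiv : PySem.Int.floordiv ((s.toList.length : Nat) : Int) 2 = ((m : Nat) : Int) := by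
      rw [PySem.Int.floordiv_eq_ediv_of_pos (by norm_num)]; omega
    rw [if_pos h1, hdiv]
    have hrange : PySem.List.pyRange 1 ((m : Int) + 1) 1
        = (List.range m).map (fun (k : Nat) => (1 : Int) + (k : Int)) := by
      rw [PySem.List.pyRange_one, show ((m : Int) + 1 - 1).toNat = m from by omega]
    rw [hrange]
    simp only [List.foldl_map]
    rw [pv_mirror_loop_odd s.toList m (by omega)]
    have hrev : ((s.toList.take m).reverse).take m = (s.toList.take m).reverse := by
      apply List.take_of_length_le; simp
    have hdropN : s.toList.drop (m + 1 + m) = ([] : List Char) := by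
      apply List.drop_eq_nil_of_le; omega
    rw [hrev, hdropN, List.append_nil]
    have hFlen : (s.toList.take (m + 1) ++ (s.toList.take m).reverse).length
        = s.toList.length := by
      simp only [List.length_append, List.length_reverse, List.length_take]; omega
    have h2 : ¬ (PySem.Int.mod (((s.toList.take (m + 1) ++ (s.toList.take m).reverse).length : Nat) : Int) 2 = 0) := by
      rw [PySem.Int.mod_eq_emod_of_pos (by norm_num), hFlen]; omega
    rw [if_neg h2]
    rw [pv_rebuild s.toList _ hFlen]
    have h3 : ¬ (PySem.Int.mod ((s.toList.length : Nat) : Int) 2 = 0) := h1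
    rw [if_neg h3]
    rw [PySem.List.slice_to_natCast, PySem.List.slice?_none_none_neg_one]
    have hmid : PySem.List.pyGetD s.toList ((m : Nat) : Int) ' ' = s.toList.getD m ' ' :=
      PySem.List.pyGetD_natCast _ _ _
    rw [hmid]
    have hm' : m < s.toList.length := by omega
    rw [List.take_add_one]
    simp [List.getD_eq_getElem?_getD, List.getElem?_eq_getElem hm']
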